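-- pv_equiv track=rewrite | github.com/JCaesar45/Factors-of-a-Mersenne-number | basic.py | check_mersenne
-- ===== SOURCE A (Python) =====
-- import math
--
-- def check_mersenne(p):
--     """
--     Check if Mersenne number M_p = 2^p - 1 is prime or find a factor.
--
--     Args:
--         p: The exponent (must be prime for M_p to potentially be prime)
--
--     Returns:
--         String indicating whether M_p is prime or composite with a factor
--     """
--     # Check if p is prime first
--     if not is_prime(p):
--         return f"M{p} = 2^{p}-1 is not prime (exponent not prime)"
--
--     # Search for factor using the form q = 2*k*p + 1
--     # where q must be 1 or 7 mod 8, q must be prime, and 2^p mod q = 1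
--     limit = math.isqrt(2 ** p - 1)
--     k = 1
--
--     while True:
--         q = 2 * k * p + 1
--
--         # Stop if q exceeds sqrt(2^p - 1)
--         if q > limit:
--             break
--
--         # q must be 1 or 7 mod 8
--         if q % 8 not in (1, 7):
--             k += 1
--             continue
--
--         # q must be prime
--         if not is_prime(q):
--             k += 1
--             continue
--
--         # Check if 2^p mod q = 1 using modular exponentiation
--         if mod_pow(2, p, q) == 1:
--             return f"M{p} = 2^{p}-1 is composite with factor {q}"
--
--         k += 1
--
--     return f"M{p} = 2^{p}-1 is prime"
--
-- def mod_pow(base, exponent, modulus):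
--     """
--     Modular exponentiation: computes (base^exponent) % modulus efficiently.
--     Uses binary exponentiation (square-and-multiply) algorithm.
--     """
--     if modulus == 1:
--         return 0
--
--     result = 1
--     base = base % modulus
--
--     while exponent > 0:
--         # If exponent is odd, multiply base with result
--         if exponent & 1:
--             result = (result * base) % modulus
--
--         # Exponent must be even now
--         exponent = exponent >> 1  # Divide by 2
--         base = (base * base) % modulus
--
--     return result
--
-- def is_prime(n):
--     """Check if a number is prime."""
--     if n < 2:
--         return False
--     if n == 2:
--         return True
--     if n % 2 == 0:
--         return False
--
--     for i in range(3, int(math.isqrt(n)) + 1, 2):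
--         if n % i == 0:
--             return False
--
--     return True
-- ===== SOURCE B (Python) =====
-- def _is_prime(n):
--     if n < 2:
--         return False
--     i = 2
--     while i * i <= n:
--         if n % i == 0:
--             return False
--         i += 1
--     return True
--
-- def check_mersenne(p):
--     if not _is_prime(p):
--         return f"M{p} = 2^{p}-1 is not prime (exponent not prime)"
--     n = 2 ** p - 1
--     i = 2
--     while i * i <= n:
--         if n % i == 0:
--             return f"M{p} = 2^{p}-1 is composite with factor {i}"
--         i += 1
--     return f"M{p} = 2^{p}-1 is prime"
-- ===== Notes on version B (the rewrite author's own statement) =====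
-- stated objective: simpler
-- what changed: A's structured search over arithmetic-progression candidates (a mod-eight filter, a trial primality test of each candidate, square-and-multiply modular exponentiation) is replaced by plain trial division of the Mersenne number by successive integers up to its square root; the smallest divisor equals the first candidate A accepts, since every prime factor of a Mersenne number with odd prime exponent lies in A's progression and passes the mod-eight filter.
import Mathlib
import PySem

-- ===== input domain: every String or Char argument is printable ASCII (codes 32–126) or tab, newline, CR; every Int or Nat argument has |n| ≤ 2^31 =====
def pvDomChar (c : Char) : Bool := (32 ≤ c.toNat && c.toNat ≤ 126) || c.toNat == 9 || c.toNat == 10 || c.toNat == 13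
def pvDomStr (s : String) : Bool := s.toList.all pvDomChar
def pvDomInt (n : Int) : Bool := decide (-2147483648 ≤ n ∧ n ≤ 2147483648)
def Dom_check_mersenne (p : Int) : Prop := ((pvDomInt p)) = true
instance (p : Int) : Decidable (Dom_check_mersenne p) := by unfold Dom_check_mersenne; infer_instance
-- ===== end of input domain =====

-- B replaces A's structured candidate scan (q = 2kp+1 with mod-8 filter, primality test and
-- modular exponentiation) by plain trial division for the smallest factor of 2^p-1; objective: simpler.

-- ===== PORT A =====
-- is_prime's loop `for i in range(3, isqrt(n)+1, 2)` with early `return False`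
def isPrimeLoopA (n i stop : Int) : Bool :=
  if h : i < stop then
    if PySem.Int.mod n i == 0 then false
    else isPrimeLoopA n (i + 2) stop
  else true
termination_by (stop - i).toNat
decreasing_by omega

def is_prime_A (n : Int) : Bool :=
  if n < 2 then false
  else if n == 2 then true
  else if PySem.Int.mod n 2 == 0 then false
  else isPrimeLoopA n 3 ((Nat.sqrt n.toNat : Int) + 1)

-- mod_pow's `while exponent > 0` loop; `exponent >> 1` equals floor division by 2 (exact on all ints)
def modPowLoop (result base exponent modulus : Int) : Int :=
  if h : 0 < exponent then
    modPowLoop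
      (if PySem.Int.band exponent 1 == 0 then result else PySem.Int.mod (result * base) modulus)
      (PySem.Int.mod (base * base) modulus)
      (PySem.Int.floordiv exponent 2) modulus
  else result
termination_by exponent.toNat
decreasing_by
  rw [PySem.Int.floordiv_eq_ediv_of_pos (by norm_num : (0:Int) < 2)]; omega

def mod_pow (base exponent modulus : Int) : Int :=
  if modulus == 1 then 0
  else modPowLoop 1 (PySem.Int.mod base modulus) exponent modulus

-- check_mersenne's `while True` loop over k; returns the factor q it finds, none on break.
-- The fuel argument only makes the recursion total; check_mersenne passes enough fuel that it
-- never runs out on inputs that reach the loop (established by the lemmas below).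
def mersLoopA (p limit k : Int) : Nat → Option Int
  | 0 => none
  | fuel + 1 =>
    let q := 2 * k * p + 1
    if limit < q then none
    else if !(PySem.Int.mod q 8 == 1 || PySem.Int.mod q 8 == 7) then mersLoopA p limit (k + 1) fuel
    else if !is_prime_A q then mersLoopA p limit (k + 1) fuel
    else if mod_pow 2 p q == 1 then some q
    else mersLoopA p limit (k + 1) fuel

def check_mersenne (p : Int) : String :=
  if !is_prime_A p then
    "M" ++ PySem.Int.toStr p ++ " = 2^" ++ PySem.Int.toStr p ++ "-1 is not prime (exponent not prime)"
  else
    let limit : Int := (Nat.sqrt ((2 ^ p.toNat - 1 : Int)).toNat : Int)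
    match mersLoopA p limit 1 (limit.toNat + 2) with
    | some q => "M" ++ PySem.Int.toStr p ++ " = 2^" ++ PySem.Int.toStr p ++ "-1 is composite with factor " ++ PySem.Int.toStr q
    | none => "M" ++ PySem.Int.toStr p ++ " = 2^" ++ PySem.Int.toStr p ++ "-1 is prime"

-- ===== PORT B =====
-- _is_prime's `while i * i <= n` trial-division loop
def isPrimeLoopB (n i : Int) : Bool :=
  if h : i * i ≤ n then
    if PySem.Int.mod n i == 0 then false
    else isPrimeLoopB n (i + 1)
  else true
termination_by (n + 1 - i).toNat
decreasing_by
  have hin : i ≤ n := by nlinarith [sq_nonneg (i - 1)]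
  omega

def is_prime_B (n : Int) : Bool :=
  if n < 2 then false else isPrimeLoopB n 2

-- check_mersenne's `while i * i <= n` trial-division loop; returns the factor found, if any
def mersLoopB (n i : Int) : Option Int :=
  if h : i * i ≤ n then
    if PySem.Int.mod n i == 0 then some i
    else mersLoopB n (i + 1)
  else none
termination_by (n + 1 - i).toNat
decreasing_by
  have hin : i ≤ n := by nlinarith [sq_nonneg (i - 1)]
  omega

def check_mersenne_alt (p : Int) : String :=
  if !is_prime_B p then
    "M" ++ PySem.Int.toStr p ++ " = 2^" ++ PySem.Int.toStr p ++ "-1 is not prime (exponent not prime)"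
  else
    match mersLoopB (2 ^ p.toNat - 1 : Int) 2 with
    | some i => "M" ++ PySem.Int.toStr p ++ " = 2^" ++ PySem.Int.toStr p ++ "-1 is composite with factor " ++ PySem.Int.toStr i
    | none => "M" ++ PySem.Int.toStr p ++ " = 2^" ++ PySem.Int.toStr p ++ "-1 is prime"

-- ===== PRECONDITION & SPEC =====
def Spec_check_mersenne (p : Int) (out : String) : Prop := out = check_mersenne_alt p
instance (p : Int) (out : String) : Decidable (Spec_check_mersenne p out) := by unfold Spec_check_mersenne; infer_instance

-- ===== CLAIM (what is proved, stated in full; the proofs are below) =====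
def Claim_equal_check_mersenne : Prop := ∀ (p : Int), Dom_check_mersenne p → Spec_check_mersenne p (check_mersenne p)

-- ===== LEMMAS AND PROOFS =====

-- the common mathematical reading of both primality loops
def IsP (n : Int) : Prop := 2 ≤ n ∧ ∀ j : Int, 2 ≤ j → j * j ≤ n → ¬ j ∣ n

theorem isPrimeLoopB_iff (n i : Int) (hi : 2 ≤ i) :
    isPrimeLoopB n i = true ↔ ∀ j : Int, i ≤ j → j * j ≤ n → ¬ j ∣ n := by
  revert hi
  induction i using isPrimeLoopB.induct n with
  | case1 x h1 h2 =>
    intro hx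
    rw [isPrimeLoopB]
    simp only [dif_pos h1, h2, if_true]
    refine iff_of_false (by simp) ?_
    push Not
    exact ⟨x, le_refl x, h1, (PySem.Int.mod_eq_zero_iff_dvd n x).mp (by simpa using h2)⟩
  | case2 x h1 h2 ih =>
    intro hx
    rw [isPrimeLoopB]
    simp only [dif_pos h1, if_neg h2]
    rw [ih (by omega)]
    constructor
    · intro h j hj hjj
      rcases eq_or_lt_of_le hj with heq | hlt
      · subst heq
        intro hdvd
        exact h2 (by simpa using (PySem.Int.mod_eq_zero_iff_dvd n x).mpr hdvd)
      · exact h j (by omega) hjj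
    · intro h j hj hjj
      exact h j (by omega) hjj
  | case3 x h1 =>
    intro hx
    rw [isPrimeLoopB]
    simp only [dif_neg h1, true_iff]
    intro j hj hjj
    exact absurd (by nlinarith : x * x ≤ n) h1

theorem mersLoopB_none (n : Int) (i : Int) (hi : 2 ≤ i)
    (h : ∀ j : Int, i ≤ j → j * j ≤ n → ¬ j ∣ n) : mersLoopB n i = none := by
  revert hi h
  induction i using mersLoopB.induct n with
  | case1 x h1 h2 =>
    intro hx h
    exact absurd ((PySem.Int.mod_eq_zero_iff_dvd n x).mp (by simpa using h2))
      (h x (le_refl x) h1)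
  | case2 x h1 h2 ih =>
    intro hx h
    rw [mersLoopB]
    simp only [dif_pos h1, if_neg h2]
    exact ih (by omega) (fun j hj hjj => h j (by omega) hjj)
  | case3 x h1 =>
    intro _ _
    rw [mersLoopB]
    simp [h1]

theorem mersLoopB_some (n d : Int) (hd2 : 2 ≤ d) (hdvd : d ∣ n) (hdsq : d * d ≤ n) :
    ∀ i : Int, 2 ≤ i → i ≤ d → (∀ j : Int, i ≤ j → j < d → ¬ j ∣ n) →
    mersLoopB n i = some d := by
  intro i
  induction i using mersLoopB.induct n with
  | case1 x h1 h2 =>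
    intro hx hxd hmin
    have hxdvd : x ∣ n := (PySem.Int.mod_eq_zero_iff_dvd n x).mp (by simpa using h2)
    have hxd' : x = d := by
      rcases eq_or_lt_of_le hxd with heq | hlt
      · exact heq
      · exact absurd hxdvd (hmin x (le_refl x) hlt)
    subst hxd'
    rw [mersLoopB]
    simp [h1, h2]
  | case2 x h1 h2 ih =>
    intro hx hxd hmin
    have hxd' : x < d := by
      rcases eq_or_lt_of_le hxd with heq | hlt
      · subst heq
        exact absurd (by simpa using (PySem.Int.mod_eq_zero_iff_dvd n x).mpr hdvd) h2
      · exact hlt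
    rw [mersLoopB]
    simp only [dif_pos h1, if_neg h2]
    exact ih (by omega) (by omega) (fun j hj hjd => hmin j (by omega) hjd)
  | case3 x h1 =>
    intro hx hxd hmin
    exact absurd (by nlinarith : x * x ≤ n) h1

theorem is_prime_B_iff (n : Int) : is_prime_B n = true ↔ IsP n := by
  unfold is_prime_B IsP
  split_ifs with h
  · exact iff_of_false (by simp) (by rintro ⟨h2, -⟩; omega)
  · rw [isPrimeLoopB_iff n 2 (le_refl 2)]
    constructor
    · exact fun hh => ⟨by omega, hh⟩
    · exact fun hh => hh.2

theorem int_sq_le (j n : Int) (h2 : 2 ≤ j) (h : j * j ≤ n) : j.toNat * j.toNat ≤ n.toNat := by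
  have hj : (j.toNat : Int) = j := Int.toNat_of_nonneg (by omega)
  have hn : (n.toNat : Int) = n := Int.toNat_of_nonneg (by nlinarith)
  have : (↑(j.toNat * j.toNat) : Int) ≤ (n.toNat : Int) := by push_cast; rw [hj, hn]; exact h
  exact_mod_cast this

theorem IsP_iff_prime (n : Int) : IsP n ↔ 2 ≤ n ∧ Nat.Prime n.toNat := by
  constructor
  · rintro ⟨hn2, h⟩
    refine ⟨hn2, ?_⟩
    rw [Nat.prime_def_le_sqrt]
    refine ⟨by omega, ?_⟩
    intro m hm hms hdvd
    have hmm : m * m ≤ n.toNat := Nat.le_sqrt.mp hms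
    refine h (↑m) (by exact_mod_cast hm) ?_ ?_
    · have : (↑(m * m) : Int) ≤ ↑n.toNat := by exact_mod_cast hmm
      rw [Int.toNat_of_nonneg (by omega)] at this
      push_cast at this
      exact this
    · rw [← Int.toNat_of_nonneg (show (0:Int) ≤ n by omega)]
      exact_mod_cast hdvd
  · rintro ⟨hn2, hp⟩
    refine ⟨hn2, ?_⟩
    intro j hj hjj hdvd
    rw [Nat.prime_def_le_sqrt] at hp
    refine hp.2 j.toNat (by omega) (Nat.le_sqrt.mpr (int_sq_le j n hj hjj)) ?_
    have hj' : (j.toNat : Int) = j := Int.toNat_of_nonneg (by omega)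
    have hn' : (n.toNat : Int) = n := Int.toNat_of_nonneg (by omega)
    rw [← Int.natCast_dvd_natCast, hj', hn']
    exact hdvd

theorem isPrimeLoopA_iff (n stop i : Int) :
    isPrimeLoopA n i stop = true ↔
      ∀ j : Int, i ≤ j → j < stop → j % 2 = i % 2 → ¬ j ∣ n := by
  induction i using isPrimeLoopA.induct n stop with
  | case1 x h1 h2 =>
    rw [isPrimeLoopA]
    simp only [dif_pos h1, h2, if_true]
    refine iff_of_false (by simp) ?_
    push Not
    exact ⟨x, le_refl x, h1, rfl, (PySem.Int.mod_eq_zero_iff_dvd n x).mp (by simpa using h2)⟩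
  | case2 x h1 h2 ih =>
    rw [isPrimeLoopA]
    simp only [dif_pos h1, if_neg h2]
    rw [ih]
    constructor
    · intro h j hj hjs hpar
      rcases eq_or_lt_of_le hj with heq | hlt
      · subst heq
        intro hdvd
        exact h2 (by simpa using (PySem.Int.mod_eq_zero_iff_dvd n x).mpr hdvd)
      · exact h j (by omega) hjs (by omega)
    · intro h j hj hjs hpar
      exact h j (by omega) hjs (by omega)
  | case3 x h1 =>
    rw [isPrimeLoopA]
    simp only [dif_neg h1, true_iff]
    intro j hj hjs hpar
    omega

theorem is_prime_A_iff (n : Int) : is_prime_A n = true ↔ IsP n := by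
  unfold is_prime_A
  split_ifs with h1 h2 h3
  · exact iff_of_false (by simp) (by rintro ⟨h2, -⟩; omega)
  · have h2' : n = 2 := by simpa using h2
    subst h2'
    refine iff_of_true rfl ⟨le_refl 2, ?_⟩
    intro j hj hjj
    nlinarith
  · -- n > 2 even: loop never entered, returns false; IsP fails at j = 2
    have h2' : ¬ n = 2 := by simpa using h2
    have hdvd2 : (2:Int) ∣ n := (PySem.Int.mod_eq_zero_iff_dvd n 2).mp (by simpa using h3)
    refine iff_of_false (by simp) ?_
    rintro ⟨hn2, h⟩
    exact h 2 (le_refl 2) (by omega) hdvd2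
  · -- n odd, ≥ 3
    have h2' : ¬ n = 2 := by simpa using h2
    have hodd : ¬ (2:Int) ∣ n := by
      intro hd
      exact h3 (by simpa using (PySem.Int.mod_eq_zero_iff_dvd n 2).mpr hd)
    have hn3 : 3 ≤ n := by omega
    rw [isPrimeLoopA_iff]
    constructor
    · intro h
      refine ⟨by omega, ?_⟩
      intro j hj hjj hdvd
      rcases Int.even_or_odd j with he | ho
      · -- even j divides n → 2 ∣ n
        exact hodd (dvd_trans (by obtain ⟨c, rfl⟩ := he; exact ⟨c, by ring⟩) hdvd)
      · have hj3 : 3 ≤ j := by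
          rcases eq_or_lt_of_le hj with heq | hlt
          · exfalso; subst heq; exact hodd hdvd
          · omega
        have hjs : j < (Nat.sqrt n.toNat : Int) + 1 := by
          have := Nat.le_sqrt.mpr (int_sq_le j n hj hjj)
          omega
        refine h j hj3 hjs ?_ hdvd
        obtain ⟨c, hc⟩ := ho
        omega
    · intro h j hj hjs hpar hdvd
      refine h.2 j (by omega) ?_ hdvd
      -- j ≤ sqrt n → j*j ≤ n
      have hjn : j.toNat ≤ Nat.sqrt n.toNat := by omega
      have := Nat.le_sqrt.mp hjn
      have hj' : (j.toNat : Int) = j := Int.toNat_of_nonneg (by omega)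
      have hn' : (n.toNat : Int) = n := Int.toNat_of_nonneg (by omega)
      calc j * j = ((j.toNat * j.toNat : Nat) : Int) := by push_cast; rw [hj']
        _ ≤ ((n.toNat : Nat) : Int) := by exact_mod_cast this
        _ = n := hn'

theorem int_pow_emod (a n : ℤ) (b : ℕ) : a ^ b % n = (a % n) ^ b % n := by
  induction b with
  | zero => simp
  | succ k ih =>
    rw [pow_succ, pow_succ, Int.mul_emod, ih]
    conv_rhs => rw [Int.mul_emod]
    rw [Int.mul_emod]
    simp [Int.emod_emod_of_dvd]

theorem emod_absorb (m x y : Int) (k : Nat) :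
    (x % m * (y % m) ^ k) % m = (x * y ^ k) % m := by
  conv_lhs => rw [Int.mul_emod]
  rw [Int.emod_emod_of_dvd _ dvd_rfl, ← int_pow_emod, ← Int.mul_emod]

theorem modPowLoop_eq (r b e m : Int) (hm : 1 < m) (hr0 : 0 ≤ r) (hrm : r < m) :
    modPowLoop r b e m = (r * b ^ e.toNat) % m := by
  revert hr0 hrm
  induction r, b, e using modPowLoop.induct m with
  | case1 r b e he ih =>
    intro hr0 hrm
    rw [modPowLoop]
    simp only [dif_pos he]
    have hband : PySem.Int.band e 1 = e % 2 := by
      rw [PySem.Int.band_one, PySem.Int.mod_eq_emod_of_pos (by norm_num)]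
    have hfd : PySem.Int.floordiv e 2 = e / 2 :=
      PySem.Int.floordiv_eq_ediv_of_pos (by norm_num)
    have hmodm : ∀ x : Int, PySem.Int.mod x m = x % m := fun x =>
      PySem.Int.mod_eq_emod_of_pos (by omega)
    by_cases hev : e % 2 = 0
    · have hcond : (PySem.Int.band e 1 == 0) = true := by simp [hband, hev]
      rw [dif_pos hcond] at ih
      rw [if_pos hcond]
      rw [hmodm, hfd] at ih ⊢
      rw [ih hr0 hrm]
      have hk : e.toNat = 2 * (e / 2).toNat := by omega
      conv_lhs => rw [← Int.emod_eq_of_lt hr0 hrm]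
      rw [emod_absorb, hk]
      congr 1
      rw [show (b * b) ^ (e / 2).toNat = b ^ (2 * (e / 2).toNat) by ring]
    · have hcond : ¬ ((PySem.Int.band e 1 == 0) = true) := by simp [hband, hev]
      rw [dif_neg hcond] at ih
      rw [if_neg hcond]
      rw [hmodm, hmodm, hfd] at ih ⊢
      have hr0' : 0 ≤ r * b % m := Int.emod_nonneg _ (by omega)
      have hrm' : r * b % m < m := Int.emod_lt_of_pos _ (by omega)
      rw [ih hr0' hrm']
      rw [emod_absorb]
      have hk : e.toNat = 2 * (e / 2).toNat + 1 := by omega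
      rw [hk]
      congr 1
      rw [show (b * b) ^ (e / 2).toNat = b ^ (2 * (e / 2).toNat) by ring]
      ring
  | case2 r b e he =>
    intro hr0 hrm
    rw [modPowLoop]
    simp only [dif_neg he]
    have : e.toNat = 0 := by omega
    rw [this, pow_zero, mul_one, Int.emod_eq_of_lt hr0 hrm]

theorem mod_pow_eq (p q : Int) (hq : 2 ≤ q) : mod_pow 2 p q = 2 ^ p.toNat % q := by
  unfold mod_pow
  rw [if_neg (show ¬ ((q == 1) = true) by simp; omega)]
  rw [modPowLoop_eq 1 _ p q (by omega) (by norm_num) (by omega), one_mul,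
    PySem.Int.mod_eq_emod_of_pos (by omega), ← int_pow_emod]

theorem mod_pow_eq_one_iff (p q : Int) (hq : 2 ≤ q) :
    mod_pow 2 p q = 1 ↔ q ∣ (2 ^ p.toNat - 1 : Int) := by
  rw [mod_pow_eq p q hq]
  have h1 : (1 : Int) % q = 1 := Int.emod_eq_of_lt (by norm_num) (by omega)
  have key : (2 ^ p.toNat - 1 : Int) % q = (2 ^ p.toNat % q - 1) % q := by
    rw [Int.sub_emod, h1]
  constructor
  · intro h
    refine Int.dvd_of_emod_eq_zero ?_
    rw [key, h]
    simp
  · intro h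
    have h0 : (2 ^ p.toNat - 1 : Int) % q = 0 := Int.emod_eq_zero_of_dvd h
    rw [key] at h0
    have hx0 : 0 ≤ (2 ^ p.toNat : Int) % q := Int.emod_nonneg _ (by omega)
    have hxq : (2 ^ p.toNat : Int) % q < q := Int.emod_lt_of_pos _ (by omega)
    have hdvd : q ∣ ((2 ^ p.toNat : Int) % q - 1) := Int.dvd_of_emod_eq_zero h0
    have := Int.eq_zero_of_abs_lt_dvd hdvd (abs_lt.mpr ⟨by linarith, by linarith⟩)
    omega

theorem mersenne_factor_form {P q : ℕ} (hP : P.Prime) (hP2 : P ≠ 2) (hq : q.Prime)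
    (hdvd : q ∣ 2 ^ P - 1) : (q % 8 = 1 ∨ q % 8 = 7) ∧ 2 * P ∣ q - 1 := by
  haveI : Fact q.Prime := ⟨hq⟩
  have hPge : 2 ≤ P := hP.two_le
  have h2P1 : 1 ≤ 2 ^ P := Nat.one_le_two_pow
  have hOdd : Odd P := hP.eq_two_or_odd'.resolve_left hP2
  have hq2 : q ≠ 2 := by
    rintro rfl
    have h2 : 2 ∣ 2 ^ P := dvd_pow_self 2 (by omega : P ≠ 0)
    omega
  have hqodd : q % 2 = 1 := hq.eq_two_or_odd.resolve_left hq2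
  have hqge : 2 ≤ q := hq.two_le
  have hcast : ((2 ^ P - 1 : ℕ) : ZMod q) = 0 := (ZMod.natCast_eq_zero_iff _ _).mpr hdvd
  have h2Pz : (2 : ZMod q) ^ P = 1 := by
    have he : ((2 ^ P - 1 : ℕ) : ZMod q) = (2 : ZMod q) ^ P - 1 := by
      push_cast [h2P1]
      ring
    rw [he] at hcast
    exact eq_of_sub_eq_zero hcast
  have h2ne : (2 : ZMod q) ≠ 0 := by
    intro h0
    have hc : ((2 : ℕ) : ZMod q) = 0 := by exact_mod_cast h0
    have := (ZMod.natCast_eq_zero_iff 2 q).mp hc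
    have := Nat.le_of_dvd (by norm_num) this
    omega
  have h2ne1 : (2 : ZMod q) ≠ 1 := by
    intro h0
    have hc : ((1 : ℕ) : ZMod q) = 0 := by push_cast; linear_combination h0
    have := (ZMod.natCast_eq_zero_iff 1 q).mp hc
    have := Nat.le_of_dvd (by norm_num) this
    omega
  have hord : orderOf (2 : ZMod q) = P := by
    rcases Nat.Prime.eq_one_or_self_of_dvd hP _ (orderOf_dvd_of_pow_eq_one h2Pz) with h1 | h
    · exact absurd (orderOf_eq_one_iff.mp h1) h2ne1
    · exact h
  have hPdvd : P ∣ q - 1 := hord ▸ ZMod.orderOf_dvd_card_sub_one h2ne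
  constructor
  · have hsq : IsSquare (2 : ZMod q) := by
      obtain ⟨m, hm⟩ := hOdd
      refine ⟨2 ^ (m + 1), ?_⟩
      have hcalc : (2 : ZMod q) ^ (m + 1) * (2 : ZMod q) ^ (m + 1) = (2 : ZMod q) ^ P * 2 := by
        rw [← pow_add, hm]
        ring
      rw [hcalc, h2Pz, one_mul]
    exact (ZMod.exists_sq_eq_two_iff hq2).mp hsq
  · have h2dvd : 2 ∣ q - 1 := by omega
    exact Nat.Coprime.mul_dvd_of_dvd_of_dvd (Nat.coprime_two_left.mpr hOdd) h2dvd hPdvd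

theorem mersLoopA_none (p limit : Int) (hp : 2 ≤ p) :
    ∀ (fuel : Nat) (k : Int), 1 ≤ k →
      (∀ k' : Int, k ≤ k' → 2 * k' * p + 1 ≤ limit → ¬ (2 * k' * p + 1) ∣ (2 ^ p.toNat - 1 : Int)) →
      mersLoopA p limit k fuel = none := by
  intro fuel
  induction fuel with
  | zero => intro k _ _; rfl
  | succ f ih =>
    intro k hk h
    show (let q := 2 * k * p + 1;
      if limit < q then none
      else if !(PySem.Int.mod q 8 == 1 || PySem.Int.mod q 8 == 7) then mersLoopA p limit (k + 1) f
      else if !is_prime_A q then mersLoopA p limit (k + 1) f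
      else if mod_pow 2 p q == 1 then some q
      else mersLoopA p limit (k + 1) f) = none
    simp only []
    have hrec : mersLoopA p limit (k + 1) f = none :=
      ih (k + 1) (by omega) (fun k' hk' => h k' (by omega))
    by_cases hbr : limit < 2 * k * p + 1
    · rw [if_pos hbr]
    · rw [if_neg hbr]
      have hq2 : 2 ≤ 2 * k * p + 1 := by nlinarith
      by_cases hc1 : (PySem.Int.mod (2 * k * p + 1) 8 == 1 || PySem.Int.mod (2 * k * p + 1) 8 == 7) = true
      · have hc1' : (PySem.Int.mod (2 * k * p + 1) 8 == 1 || PySem.Int.mod (2 * k * p + 1) 8 == 7) = true := hc1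
        rw [if_neg (show ¬ ((!(PySem.Int.mod (2 * k * p + 1) 8 == 1 || PySem.Int.mod (2 * k * p + 1) 8 == 7)) = true) by rw [hc1']; simp)]
        by_cases hc2 : is_prime_A (2 * k * p + 1) = true
        · rw [if_neg (show ¬ ((!is_prime_A (2 * k * p + 1)) = true) by rw [hc2]; simp)]
          by_cases hc3 : (mod_pow 2 p (2 * k * p + 1) == 1) = true
          · exfalso
            have hdvd := (mod_pow_eq_one_iff p _ hq2).mp (by simpa using hc3)
            exact h k (le_refl k) (by omega) hdvd
          · rw [if_neg hc3]
            exact hrec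
        · have hc2' : is_prime_A (2 * k * p + 1) = false := by revert hc2; cases is_prime_A (2 * k * p + 1) <;> simp
          rw [if_pos (show (!is_prime_A (2 * k * p + 1)) = true by rw [hc2']; rfl)]
          exact hrec
      · have hc1' : (PySem.Int.mod (2 * k * p + 1) 8 == 1 || PySem.Int.mod (2 * k * p + 1) 8 == 7) = false := by revert hc1; cases (PySem.Int.mod (2 * k * p + 1) 8 == 1 || PySem.Int.mod (2 * k * p + 1) 8 == 7) <;> simp
        rw [if_pos (show (!(PySem.Int.mod (2 * k * p + 1) 8 == 1 || PySem.Int.mod (2 * k * p + 1) 8 == 7)) = true by rw [hc1']; rfl)]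
        exact hrec

theorem mersLoopA_some (p limit d k0 : Int) (hp : 2 ≤ p) (hk0 : 1 ≤ k0)
    (hd : d = 2 * k0 * p + 1) (hdlim : d ≤ limit)
    (h8 : (PySem.Int.mod d 8 == 1 || PySem.Int.mod d 8 == 7) = true)
    (hpr : is_prime_A d = true) (hmp : mod_pow 2 p d = 1)
    (hmin : ∀ k' : Int, 1 ≤ k' → k' < k0 → ¬ (2 * k' * p + 1) ∣ (2 ^ p.toNat - 1 : Int)) :
    ∀ (fuel : Nat) (k : Int), 1 ≤ k → k ≤ k0 → (k0 - k).toNat < fuel →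
      mersLoopA p limit k fuel = some d := by
  intro fuel
  induction fuel with
  | zero => intro k _ _ hf; omega
  | succ f ih =>
    intro k hk hkk0 hf
    show (let q := 2 * k * p + 1;
      if limit < q then none
      else if !(PySem.Int.mod q 8 == 1 || PySem.Int.mod q 8 == 7) then mersLoopA p limit (k + 1) f
      else if !is_prime_A q then mersLoopA p limit (k + 1) f
      else if mod_pow 2 p q == 1 then some q
      else mersLoopA p limit (k + 1) f) = some d
    simp only []
    have hqled : 2 * k * p + 1 ≤ d := by
      rw [hd]
      have : 2 * k * p ≤ 2 * k0 * p := by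
        apply mul_le_mul_of_nonneg_right _ (by omega : (0:Int) ≤ p)
        omega
      omega
    rw [if_neg (by omega : ¬ limit < 2 * k * p + 1)]
    rcases eq_or_lt_of_le hkk0 with heq | hlt
    · subst heq
      rw [← hd]
      rw [if_neg (show ¬ ((!(PySem.Int.mod d 8 == 1 || PySem.Int.mod d 8 == 7)) = true) by rw [h8]; simp),
         if_neg (show ¬ ((!is_prime_A d) = true) by rw [hpr]; simp),
         if_pos (show (mod_pow 2 p d == 1) = true by simp [hmp])]
    · have hqltd : 2 * k * p + 1 < d := by
        rw [hd]
        have : 2 * k * p < 2 * k0 * p := by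
          apply mul_lt_mul_of_pos_right _ (by omega : (0:Int) < p)
          omega
        omega
      have hrec : mersLoopA p limit (k + 1) f = some d :=
        ih (k + 1) (by omega) (by omega) (by omega)
      by_cases hc1 : (PySem.Int.mod (2 * k * p + 1) 8 == 1 || PySem.Int.mod (2 * k * p + 1) 8 == 7) = true
      · have hc1' : (PySem.Int.mod (2 * k * p + 1) 8 == 1 || PySem.Int.mod (2 * k * p + 1) 8 == 7) = true := hc1
        rw [if_neg (show ¬ ((!(PySem.Int.mod (2 * k * p + 1) 8 == 1 || PySem.Int.mod (2 * k * p + 1) 8 == 7)) = true) by rw [hc1']; simp)]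
        by_cases hc2 : is_prime_A (2 * k * p + 1) = true
        · rw [if_neg (show ¬ ((!is_prime_A (2 * k * p + 1)) = true) by rw [hc2]; simp)]
          by_cases hc3 : (mod_pow 2 p (2 * k * p + 1) == 1) = true
          · exfalso
            have hq2 : 2 ≤ 2 * k * p + 1 := by nlinarith
            have hdvd := (mod_pow_eq_one_iff p _ hq2).mp (by simpa using hc3)
            exact hmin k (by omega) hlt hdvd
          · rw [if_neg hc3]
            exact hrec
        · have hc2' : is_prime_A (2 * k * p + 1) = false := by revert hc2; cases is_prime_A (2 * k * p + 1) <;> simp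
          rw [if_pos (show (!is_prime_A (2 * k * p + 1)) = true by rw [hc2']; rfl)]
          exact hrec
      · have hc1' : (PySem.Int.mod (2 * k * p + 1) 8 == 1 || PySem.Int.mod (2 * k * p + 1) 8 == 7) = false := by revert hc1; cases (PySem.Int.mod (2 * k * p + 1) 8 == 1 || PySem.Int.mod (2 * k * p + 1) 8 == 7) <;> simp
        rw [if_pos (show (!(PySem.Int.mod (2 * k * p + 1) 8 == 1 || PySem.Int.mod (2 * k * p + 1) 8 == 7)) = true by rw [hc1']; rfl)]
        exact hrec

theorem loops_agree (p : Int) (hp2 : 2 ≤ p) (hPp : Nat.Prime p.toNat) :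
    mersLoopA p (Nat.sqrt ((2 ^ p.toNat - 1 : Int)).toNat : Int) 1
      ((Nat.sqrt ((2 ^ p.toNat - 1 : Int)).toNat : Int).toNat + 2) =
    mersLoopB (2 ^ p.toNat - 1 : Int) 2 := by
  set n : Int := 2 ^ p.toNat - 1 with hn
  set limit : Int := (Nat.sqrt n.toNat : Int) with hlimdef
  have hP2' : 2 ≤ p.toNat := by omega
  have hn3 : 3 ≤ n := by
    have h4 : (4 : Int) ≤ 2 ^ p.toNat := by
      calc (4:Int) = 2 ^ 2 := by norm_num
        _ ≤ 2 ^ p.toNat := pow_le_pow_right₀ (by norm_num) hP2'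
    omega
  have hMn : ((n.toNat : Int)) = n := Int.toNat_of_nonneg (by omega)
  have hlim : ∀ q : Int, 2 ≤ q → (q ≤ limit ↔ q * q ≤ n) := by
    intro q hq
    constructor
    · intro h
      have h1 : q.toNat ≤ Nat.sqrt n.toNat := by omega
      have h2 : q.toNat * q.toNat ≤ n.toNat := Nat.le_sqrt.mp h1
      have hq' : ((q.toNat : Int)) = q := Int.toNat_of_nonneg (by omega)
      calc q * q = ((q.toNat * q.toNat : ℕ) : Int) := by push_cast; rw [hq']
        _ ≤ ((n.toNat : ℕ) : Int) := by exact_mod_cast h2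
        _ = n := hMn
    · intro h
      have := Nat.le_sqrt.mpr (int_sq_le q n hq h)
      omega
  by_cases hex : ∃ j : Int, 2 ≤ j ∧ j * j ≤ n ∧ j ∣ n
  · obtain ⟨j, hj2, hjsq, hjdvd⟩ := hex
    have hM1 : n.toNat ≠ 1 := by omega
    set mf := n.toNat.minFac with hmfdef
    have hmfp : mf.Prime := Nat.minFac_prime hM1
    have hmfdvd_nat : mf ∣ n.toNat := Nat.minFac_dvd _
    have hmfdvd : (mf : Int) ∣ n := by rw [← hMn]; exact_mod_cast hmfdvd_nat
    have hmf2 : (2:Int) ≤ (mf : Int) := by exact_mod_cast hmfp.two_le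
    have hminI : ∀ j' : Int, 2 ≤ j' → j' ∣ n → (mf : Int) ≤ j' := by
      intro j' h1 h2
      have hj' : ((j'.toNat : Int)) = j' := Int.toNat_of_nonneg (by omega)
      have hdn : j'.toNat ∣ n.toNat := by
        rw [← Int.natCast_dvd_natCast, hj', hMn]
        exact h2
      have := Nat.minFac_le_of_dvd (by omega) hdn
      omega
    have hdj : (mf : Int) ≤ j := hminI j hj2 hjdvd
    have hdsq : (mf : Int) * (mf : Int) ≤ n :=
      le_trans (mul_le_mul hdj hdj (by omega) (by omega)) hjsq
    have hP2 : p.toNat ≠ 2 := by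
      intro h2
      rw [hn, h2] at hjsq
      nlinarith
    have hnnat : n.toNat = 2 ^ p.toNat - 1 := by
      have h1 : ((2 ^ p.toNat - 1 : ℕ) : Int) = n := by
        push_cast [Nat.one_le_two_pow]
        rw [hn]
      omega
    have hdvd_nat : mf ∣ 2 ^ p.toNat - 1 := by rw [← hnnat]; exact hmfdvd_nat
    obtain ⟨h8nat, h2Pdvd⟩ := mersenne_factor_form hPp hP2 hmfp hdvd_nat
    obtain ⟨t, ht⟩ := h2Pdvd
    have ht1 : 1 ≤ t := by
      rcases Nat.eq_zero_or_pos t with h0 | h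
      · rw [h0, Nat.mul_zero] at ht
        have := hmfp.two_le
        omega
      · exact h
    have hk01 : (1:Int) ≤ (t:Int) := by exact_mod_cast ht1
    have hp0 : ((p.toNat : Int)) = p := Int.toNat_of_nonneg (by omega)
    have hdk0 : (mf : Int) = 2 * (t:Int) * p + 1 := by
      have h1 : ((mf - 1 : ℕ) : Int) = ((2 * p.toNat * t : ℕ) : Int) := by rw [ht]
      rw [Nat.cast_sub (by omega : 1 ≤ mf)] at h1
      push_cast at h1
      rw [hp0] at h1
      linarith [h1]
    have h8 : (PySem.Int.mod (mf:Int) 8 == 1 || PySem.Int.mod (mf:Int) 8 == 7) = true := by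
      have hmod : PySem.Int.mod (mf:Int) 8 = ((mf % 8 : ℕ) : Int) := by
        rw [PySem.Int.mod_eq_emod_of_pos (by norm_num : (0:Int) < 8)]
        push_cast
        rfl
      rcases h8nat with h | h <;> rw [hmod, h] <;> simp
    have hpr : is_prime_A (mf:Int) = true := by
      rw [is_prime_A_iff, IsP_iff_prime]
      exact ⟨hmf2, by simpa using hmfp⟩
    have hmp : mod_pow 2 p (mf:Int) = 1 := (mod_pow_eq_one_iff p _ hmf2).mpr (by rw [← hn]; exact hmfdvd)
    have hdlim : (mf:Int) ≤ limit := (hlim _ hmf2).mpr hdsq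
    have hminA : ∀ k' : Int, 1 ≤ k' → k' < (t:Int) → ¬ (2 * k' * p + 1) ∣ (2 ^ p.toNat - 1 : Int) := by
      intro k' h1 h2 hdvd'
      have hq2 : (2:Int) ≤ 2 * k' * p + 1 := by nlinarith
      have hge := hminI _ hq2 (by rw [hn]; exact hdvd')
      nlinarith
    have hfuel : ((t:Int) - 1).toNat < limit.toNat + 2 := by
      have h41 : 4 * (t:Int) + 1 ≤ limit := by nlinarith [hdk0, hdlim]
      omega
    rw [mersLoopA_some p limit (mf:Int) (t:Int) hp2 hk01 hdk0 hdlim h8 hpr hmp hminA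
        (limit.toNat + 2) 1 (by norm_num) (by omega) hfuel]
    rw [mersLoopB_some n (mf:Int) hmf2 hmfdvd hdsq 2 (le_refl 2) hmf2
        (fun j' hj'2 hj'd hdvd' => absurd (hminI j' hj'2 hdvd') (by omega))]
  · push Not at hex
    rw [mersLoopA_none p limit hp2 (limit.toNat + 2) 1 (by norm_num) ?_,
        mersLoopB_none n 2 (le_refl 2) (fun j hj hjj => hex j (by omega) hjj)]
    intro k' hk' hle hdvd
    have hq2 : (2:Int) ≤ 2 * k' * p + 1 := by nlinarith
    exact hex _ hq2 ((hlim _ hq2).mp hle) (by rw [hn]; exact hdvd)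

theorem main_eq (p : Int) : check_mersenne p = check_mersenne_alt p := by
  have hAB : is_prime_A p = is_prime_B p := by
    rw [Bool.eq_iff_iff, is_prime_A_iff, is_prime_B_iff]
  unfold check_mersenne check_mersenne_alt
  rw [hAB]
  by_cases hBp : is_prime_B p = true
  · rw [hBp]
    simp only [Bool.not_true, Bool.false_eq_true, if_false]
    have hIsP := (IsP_iff_prime p).mp ((is_prime_B_iff p).mp hBp)
    rw [loops_agree p hIsP.1 hIsP.2]
  · have hBp' : is_prime_B p = false := by revert hBp; cases is_prime_B p <;> simp
    rw [hBp']
    rfl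

-- ===== VERDICT (by name: the statement is the Claim_ definition above) =====
theorem check_mersenne_spec : Claim_equal_check_mersenne := by
  intro p _
  unfold Spec_check_mersenne
  exact main_eq p
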